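-- pv_equiv track=rewrite | github.com/podkidyshev/health-weather_correlation | source_original/Анализ группы 18 образцов с 11 эталонами/Групповой_анализ_всех_со_всеми.py | sequence_distance
-- ===== SOURCE A (Python) =====
-- def sequence_distance(x, y):
--     """вычисление расстояний от максимумов образца до ближайшего максимума эталона"""
--     x.insert(0,0)
--     u = []
--     for i in range(len(x)):
--         if x[i] == 1:
--             for j in range(len(y)):
--                 if ( i - j >= 0 and y[i - j ] == 1) and ( i + j < len(y) and y[i + j ] == 1):
--                     if j == 0:
--                         u.append(j)
--                     else:
--                         u.append(j)
--                         u.append(-j)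
--                     break
--                 elif ( i - j >= 0 and y[i - j ] == 1) :
--                     u.append(j)
--                     break
--                 elif ( i + j < len(y)  and y[i + j ] == 1):
--                     u.append(-j)
--                     break
--     return u
-- ===== SOURCE B (Python) =====
-- def sequence_distance(x, y):
--     """вычисление расстояний от максимумов образца до ближайшего максимума эталона"""
--     # same in-place mutation as the original (x gets a leading 0)
--     x.insert(0, 0)
--     m = len(y)
--     if m == 0:
--         return []
--     # two linear passes over y: nearest reference peak at-or-left / at-or-right of each index
--     left = []
--     last = None
--     for k in range(m):
--         if y[k] == 1:
--             last = k
--         left.append(last)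
--     right = [None] * m
--     nxt = None
--     for k in range(m - 1, -1, -1):
--         if y[k] == 1:
--             nxt = k
--         right[k] = nxt
--     u = []
--     for i, v in enumerate(x):
--         if v == 1:
--             l = left[i]
--             r = right[i]
--             if l is None and r is None:
--                 continue
--             elif l is None:
--                 u.append(-(r - i))
--             elif r is None:
--                 u.append(i - l)
--             else:
--                 dl = i - l
--                 dr = r - i
--                 if dl == dr:
--                     u.append(dl)
--                     if dl != 0:
--                         u.append(-dl)
--                 elif dl < dr:
--                     u.append(dl)
--                 else:
--                     u.append(-dr)
--     return u
-- ===== Notes on version B (the rewrite author's own statement) =====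
-- stated objective: alternative
-- what changed: A searches outward from every sample peak over y (nested loop); B precomputes the nearest reference-peak index at-or-left and at-or-right of every position in two linear passes over y, then answers each peak with an O(1) table lookup.
import Mathlib
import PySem

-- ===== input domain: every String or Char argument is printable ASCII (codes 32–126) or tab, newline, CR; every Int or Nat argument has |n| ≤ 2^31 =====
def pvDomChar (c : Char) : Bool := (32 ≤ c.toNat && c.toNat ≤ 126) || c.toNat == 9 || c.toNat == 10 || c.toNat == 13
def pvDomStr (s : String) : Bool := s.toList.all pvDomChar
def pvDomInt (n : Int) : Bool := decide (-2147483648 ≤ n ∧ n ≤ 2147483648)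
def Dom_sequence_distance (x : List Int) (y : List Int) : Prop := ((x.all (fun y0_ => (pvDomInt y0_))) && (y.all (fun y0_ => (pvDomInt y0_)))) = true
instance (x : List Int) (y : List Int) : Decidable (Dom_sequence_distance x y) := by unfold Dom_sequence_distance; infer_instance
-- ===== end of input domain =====

-- B replaces A's per-peak outward search over y by two linear passes precomputing the
-- nearest reference peak at-or-left / at-or-right of each index, then one lookup per peak.
-- Both Pythons mutate x in place identically (x.insert(0,0)); the theorems are about the
-- return value.

-- ===== PORT A =====
-- inner 'for j in range(len(y)): ... break' loop; fuel counts the remaining iterations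
def innerLoopA (y : List Int) (i : Int) : Nat → Nat → List Int
  | 0, _ => []
  | fuel+1, j =>
    if (0 ≤ i - (j:Int) ∧ (PySem.List.pyGet? y (i - (j:Int))).getD 0 = 1) ∧
       ((i + (j:Int) < (y.length : Int)) ∧ (PySem.List.pyGet? y (i + (j:Int))).getD 0 = 1) then
      (if j = 0 then [(j:Int)] else [(j:Int), -(j:Int)])
    else if 0 ≤ i - (j:Int) ∧ (PySem.List.pyGet? y (i - (j:Int))).getD 0 = 1 then
      [(j:Int)]
    else if (i + (j:Int) < (y.length : Int)) ∧ (PySem.List.pyGet? y (i + (j:Int))).getD 0 = 1 then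
      [-(j:Int)]
    else
      innerLoopA y i fuel (j+1)

def sequence_distance (x : List Int) (y : List Int) : List Int :=
  let x' := 0 :: x          -- x.insert(0, 0)
  (PySem.List.pyRange 0 (x'.length : Int) 1).foldl
    (fun u i => if (PySem.List.pyGet? x' i).getD 0 = 1 then u ++ innerLoopA y i y.length 0 else u)
    []

-- ===== PORT B =====
-- forward pass: left.append(last) where last = latest k with y[k] == 1
def goL (y : List Int) (last : Option Nat) (k : Nat) : List (Option Nat) :=
  match y with
  | [] => []
  | v :: rest =>
    let last' := if v = 1 then some k else last
    last' :: goL rest last' (k+1)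

-- backward pass (k descending): right[k] = nxt, the earliest index ≥ k with y[k] == 1
def goR (y : List Int) (k : Nat) : List (Option Nat) × Option Nat :=
  match y with
  | [] => ([], none)
  | v :: rest =>
    let p := goR rest (k+1)
    let nxt' := if v = 1 then some k else p.2
    (nxt' :: p.1, nxt')

-- body of B's final loop: combine the two precomputed neighbours of index i
def combineB (i : Int) (l r : Option Nat) : List Int :=
  match l, r with
  | none, none => []
  | none, some rk => [-((rk:Int) - i)]
  | some lk, none => [i - (lk:Int)]
  | some lk, some rk =>
    let dl : Int := i - (lk:Int)
    let dr : Int := (rk:Int) - i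
    if dl = dr then (if dl = 0 then [dl] else [dl, -dl])
    else if dl < dr then [dl]
    else [-dr]

def sequence_distance_alt (x : List Int) (y : List Int) : List Int :=
  let x' := 0 :: x          -- x.insert(0, 0)
  if y.length = 0 then [] else
  let left := goL y none 0
  let right := (goR y 0).1
  (PySem.List.enumerate x').foldl
    (fun u iv => if iv.2 = 1 then
        u ++ combineB iv.1 ((PySem.List.pyGet? left iv.1).getD none) ((PySem.List.pyGet? right iv.1).getD none)
      else u)
    []

-- ===== PRECONDITION & SPEC =====
-- Pre_ excludes exactly the inputs on which A raises IndexError: y nonempty while some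
-- sample peak (value 1 in x, shifted by the inserted 0) sits at an index ≥ len(y).
def Pre_sequence_distance (x : List Int) (y : List Int) : Prop :=
  y = [] ∨ ∀ p : Nat, p < x.length → x.getD p 0 = 1 → p + 1 < y.length
instance (x : List Int) (y : List Int) : Decidable (Pre_sequence_distance x y) := by
  unfold Pre_sequence_distance; infer_instance

def pvWitness_sequence_distance : List Int × List Int := ([1, 0, 1, 0], [0, 1, 0, 0, 1, 0])

def Spec_sequence_distance (x : List Int) (y : List Int) (out : List Int) : Prop := out = sequence_distance_alt x y
instance (x : List Int) (y : List Int) (out : List Int) : Decidable (Spec_sequence_distance x y out) := by unfold Spec_sequence_distance; infer_instance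

-- ===== CLAIM (what is proved, stated in full; the proofs are below) =====
def Claim_equal_sequence_distance : Prop := ∀ (x : List Int) (y : List Int), Dom_sequence_distance x y → Pre_sequence_distance x y → Spec_sequence_distance x y (sequence_distance x y)

-- ===== LEMMAS AND PROOFS =====

-- characterization of the forward pass: entry i is the greatest index ≤ i holding a 1
-- (offset by k), or the accumulator if there is none

-- the second component of the backward pass is the least index holding a 1 (offset by k)


lemma goL_char (y : List Int) (last : Option Nat) (k i : Nat) (h : i < y.length) :
    ((∀ d ≤ i, y.getD d 0 ≠ 1) ∧ (goL y last k).getD i none = last)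
    ∨ (∃ d, d ≤ i ∧ y.getD d 0 = 1 ∧ (∀ d', d < d' → d' ≤ i → y.getD d' 0 ≠ 1)
        ∧ (goL y last k).getD i none = some (k + d)) := by
  induction y generalizing last k i with
  | nil => simp at h
  | cons v rest ih =>
    cases i with
    | zero =>
      by_cases hv : v = 1
      · right; exact ⟨0, le_refl _, by simpa [hv], by omega, by simp [goL, hv]⟩
      · left
        refine ⟨?_, by simp [goL, hv]⟩
        intro d hd; interval_cases d; simpa using hv
    | succ i =>
      have h' : i < rest.length := by simpa using h
      have step : (goL (v :: rest) last k).getD (i+1) none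
          = (goL rest (if v = 1 then some k else last) (k+1)).getD i none := by
        simp [goL]
      rcases ih (if v = 1 then some k else last) (k+1) i h' with ⟨hno, hval⟩ | ⟨d, hd, h1, hmax, hval⟩
      · by_cases hv : v = 1
        · right
          refine ⟨0, by omega, by simpa [hv], ?_, ?_⟩
          · intro d' hd0 hdi
            cases d' with
            | zero => omega
            | succ d'' => simpa using hno d'' (by omega)
          · rw [step, hval]; simp [hv]
        · left
          refine ⟨?_, by rw [step, hval]; simp [hv]⟩
          intro d hd
          cases d with
          | zero => simpa using hv
          | succ d'' => simpa using hno d'' (by omega)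
      · right
        refine ⟨d+1, by omega, by simpa using h1, ?_, ?_⟩
        · intro d' hd0 hdi
          cases d' with
          | zero => omega
          | succ d'' => simpa using hmax d'' (by omega) (by omega)
        · rw [step, hval]; congr 1; omega

lemma goR_snd_char (y : List Int) (k : Nat) :
    ((∀ d, d < y.length → y.getD d 0 ≠ 1) ∧ (goR y k).2 = none)
    ∨ (∃ d, d < y.length ∧ y.getD d 0 = 1 ∧ (∀ d', d' < d → y.getD d' 0 ≠ 1)
        ∧ (goR y k).2 = some (k + d)) := by
  induction y generalizing k with
  | nil => left; simp [goR]
  | cons v rest ih =>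
    by_cases hv : v = 1
    · right; exact ⟨0, by simp, by simpa [hv], by omega, by simp [goR, hv]⟩
    · rcases ih (k+1) with ⟨hno, hval⟩ | ⟨d, hd, h1, hmin, hval⟩
      · left
        refine ⟨?_, by simp [goR, hv, hval]⟩
        intro d hd
        cases d with
        | zero => simpa using hv
        | succ d'' => exact fun hc => hno d'' (by simpa using hd) (by simpa using hc)
      · right
        refine ⟨d+1, by simpa using hd, by simpa using h1, ?_, ?_⟩
        · intro d' hd'
          cases d' with
          | zero => simpa using hv
          | succ d'' => simpa using hmin d'' (by omega)
        · simp [goR, hv, hval]; omega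

lemma goR_fst_getD (y : List Int) (k i : Nat) (h : i < y.length) :
    ((goR y k).1).getD i none = (goR (y.drop i) (k+i)).2 := by
  induction y generalizing k i with
  | nil => simp at h
  | cons v rest ih =>
    cases i with
    | zero => simp [goR]
    | succ i =>
      have h' : i < rest.length := by simpa using h
      have hih := ih (k+1) i h'
      have harith : k + 1 + i = k + (i + 1) := by omega
      simpa [goR, harith] using hih

-- the inner search of A computes exactly B's combination of the two nearest neighbours
lemma inner_go (y : List Int) (inat : Nat) (L R : Option Nat)
    (hL1 : ∀ q, L = some q → q ≤ inat ∧ y.getD q 0 = 1 ∧ ∀ q', q < q' → q' ≤ inat → y.getD q' 0 ≠ 1)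
    (hL2 : L = none → ∀ q, q ≤ inat → y.getD q 0 ≠ 1)
    (hR1 : ∀ q, R = some q → inat ≤ q ∧ q < y.length ∧ y.getD q 0 = 1 ∧ ∀ q', inat ≤ q' → q' < q → y.getD q' 0 ≠ 1)
    (hR2 : R = none → ∀ q, inat ≤ q → q < y.length → y.getD q 0 ≠ 1)
    (hm : inat < y.length) :
    ∀ fuel j, j + fuel = y.length →
    (∀ d, d < j → ¬(d ≤ inat ∧ y.getD (inat - d) 0 = 1)) →
    (∀ d, d < j → ¬(inat + d < y.length ∧ y.getD (inat + d) 0 = 1)) →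
    innerLoopA y (inat : Int) fuel j = combineB (inat : Int) L R := by
  intro fuel
  induction fuel with
  | zero =>
    intro j hj inv1 inv2
    have hLn : L = none := by
      cases hL : L with
      | none => rfl
      | some q =>
        obtain ⟨hq1, hq2, -⟩ := hL1 q hL
        exact absurd ⟨by omega, by rwa [show inat - (inat - q) = q by omega]⟩
          (inv1 (inat - q) (by omega))
    have hRn : R = none := by
      cases hR : R with
      | none => rfl
      | some q =>
        obtain ⟨hq1, hq1', hq2, -⟩ := hR1 q hR
        exact absurd ⟨by omega, by rwa [show inat + (q - inat) = q by omega]⟩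
          (inv2 (q - inat) (by omega))
    simp [innerLoopA, hLn, hRn, combineB]
  | succ fuel ih =>
    intro j hj inv1 inv2
    have e1 : (0 ≤ (inat:Int) - (j:Int) ∧ (PySem.List.pyGet? y ((inat:Int) - (j:Int))).getD 0 = 1)
        ↔ (j ≤ inat ∧ y.getD (inat - j) 0 = 1) := by
      constructor
      · rintro ⟨h0, hg⟩
        have hjle : j ≤ inat := by omega
        refine ⟨hjle, ?_⟩
        rw [show (inat:Int) - (j:Int) = ((inat - j : Nat) : Int) by omega,
          PySem.List.pyGet?_natCast] at hg
        rwa [List.getD_eq_getElem?_getD]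
      · rintro ⟨hjle, hg⟩
        refine ⟨by omega, ?_⟩
        rw [show (inat:Int) - (j:Int) = ((inat - j : Nat) : Int) by omega,
          PySem.List.pyGet?_natCast]
        rwa [List.getD_eq_getElem?_getD] at hg
    have e2 : (((inat:Int) + (j:Int) < (y.length : Int)) ∧ (PySem.List.pyGet? y ((inat:Int) + (j:Int))).getD 0 = 1)
        ↔ (inat + j < y.length ∧ y.getD (inat + j) 0 = 1) := by
      rw [show (inat:Int) + (j:Int) = ((inat + j : Nat) : Int) by push_cast; ring,
        PySem.List.pyGet?_natCast, ← List.getD_eq_getElem?_getD]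
      constructor
      · rintro ⟨h0, hg⟩; exact ⟨by exact_mod_cast h0, hg⟩
      · rintro ⟨h0, hg⟩; exact ⟨by exact_mod_cast h0, hg⟩
    by_cases hl : j ≤ inat ∧ y.getD (inat - j) 0 = 1
    · have hLs : L = some (inat - j) := by
        cases hL : L with
        | none => exact absurd hl.2 (hL2 hL (inat - j) (by omega))
        | some q =>
          obtain ⟨hq1, hq2, hq3⟩ := hL1 q hL
          rcases lt_trichotomy q (inat - j) with hlt | heq | hgt
          · exact absurd hl.2 (hq3 (inat - j) hlt (by omega))
          · rw [heq]
          · exact absurd ⟨by omega, by rwa [show inat - (inat - q) = q by omega]⟩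
              (inv1 (inat - q) (by omega))
      by_cases hr : inat + j < y.length ∧ y.getD (inat + j) 0 = 1
      · have hRs : R = some (inat + j) := by
          cases hR : R with
          | none => exact absurd hr.2 (hR2 hR (inat + j) (by omega) hr.1)
          | some q =>
            obtain ⟨hq1, hq1', hq2, hq3⟩ := hR1 q hR
            rcases lt_trichotomy q (inat + j) with hlt | heq | hgt
            · exact absurd ⟨by omega, by rwa [show inat + (q - inat) = q by omega]⟩
                (inv2 (q - inat) (by omega))
            · rw [heq]
            · exact absurd hr.2 (hq3 (inat + j) (by omega) hgt)
        rw [innerLoopA]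
        rw [if_pos ⟨e1.mpr hl, e2.mpr hr⟩, hLs, hRs]
        simp only [combineB]
        rw [show (inat:Int) - ((inat - j : Nat) : Int) = (j:Int) by omega,
          show ((inat + j : Nat) : Int) - (inat:Int) = (j:Int) by push_cast; ring]
        by_cases hj0 : j = 0 <;> simp [hj0]
      · rw [innerLoopA]
        rw [if_neg (by rw [e1, e2]; tauto), if_pos (e1.mpr hl), hLs]
        cases hR : R with
        | none =>
          simp only [combineB]
          rw [show (inat:Int) - ((inat - j : Nat) : Int) = (j:Int) by omega]
        | some q =>
          obtain ⟨hq1, hq1', hq2, hq3⟩ := hR1 q hR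
          have hdq : j < q - inat := by
            rcases lt_trichotomy (q - inat) j with hlt | heq | hgt
            · exact absurd ⟨by omega, by rwa [show inat + (q - inat) = q by omega]⟩
                (inv2 (q - inat) hlt)
            · exact absurd ⟨by omega, by rwa [show inat + j = q by omega]⟩ hr
            · exact hgt
          simp only [combineB]
          rw [show (inat:Int) - ((inat - j : Nat) : Int) = (j:Int) by omega]
          rw [if_neg (by omega), if_pos (by omega)]
    · by_cases hr : inat + j < y.length ∧ y.getD (inat + j) 0 = 1
      · have hRs : R = some (inat + j) := by
          cases hR : R with
          | none => exact absurd hr.2 (hR2 hR (inat + j) (by omega) hr.1)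
          | some q =>
            obtain ⟨hq1, hq1', hq2, hq3⟩ := hR1 q hR
            rcases lt_trichotomy q (inat + j) with hlt | heq | hgt
            · exact absurd ⟨by omega, by rwa [show inat + (q - inat) = q by omega]⟩
                (inv2 (q - inat) (by omega))
            · rw [heq]
            · exact absurd hr.2 (hq3 (inat + j) (by omega) hgt)
        rw [innerLoopA]
        rw [if_neg (by rw [e1, e2]; tauto), if_neg (by rw [e1]; exact hl), if_pos (e2.mpr hr), hRs]
        cases hL : L with
        | none =>
          simp only [combineB]
          rw [show ((inat + j : Nat) : Int) - (inat:Int) = (j:Int) by push_cast; ring]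
        | some q =>
          obtain ⟨hq1, hq2, hq3⟩ := hL1 q hL
          have hdq : j < inat - q := by
            rcases lt_trichotomy (inat - q) j with hlt | heq | hgt
            · exact absurd ⟨by omega, by rwa [show inat - (inat - q) = q by omega]⟩
                (inv1 (inat - q) hlt)
            · exact absurd ⟨by omega, by rwa [show inat - j = q by omega]⟩ hl
            · exact hgt
          simp only [combineB]
          rw [show ((inat + j : Nat) : Int) - (inat:Int) = (j:Int) by push_cast; ring]
          rw [if_neg (by omega), if_neg (by omega)]
      · rw [innerLoopA]
        rw [if_neg (by rw [e1, e2]; tauto), if_neg (by rw [e1]; exact hl),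
          if_neg (by rw [e2]; exact hr)]
        refine ih (j+1) (by omega) ?_ ?_
        · intro d hd
          by_cases hdj : d = j
          · rw [hdj]; exact hl
          · exact inv1 d (by omega)
        · intro d hd
          by_cases hdj : d = j
          · rw [hdj]; exact hr
          · exact inv2 d (by omega)

lemma foldl_if_flat {α : Type} (p : α → Prop) [DecidablePred p] (f : α → List Int) :
    ∀ (l : List α) (acc : List Int),
      l.foldl (fun u a => if p a then u ++ f a else u) acc
        = acc ++ l.flatMap (fun a => if p a then f a else []) := by
  intro l
  induction l with
  | nil => intro acc; simp
  | cons a t ih =>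
    intro acc
    by_cases h : p a <;> simp [h, ih, List.append_assoc]

lemma flatMap_congr_mem {α : Type} (l : List α) (f g : α → List Int)
    (h : ∀ a ∈ l, f a = g a) : l.flatMap f = l.flatMap g := by
  induction l with
  | nil => rfl
  | cons a t ih => simp [List.flatMap_cons, h a (by simp), ih (fun b hb => h b (by simp [hb]))]

lemma getD_drop_aux (y : List Int) (k d : Nat) :
    (y.drop k).getD d 0 = y.getD (k + d) 0 := by
  simp [List.getD_eq_getElem?_getD, List.getElem?_drop]

lemma per_index (x y : List Int)
    (hpre : ∀ p : Nat, p < x.length → x.getD p 0 = 1 → p + 1 < y.length)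
    (k : Nat) (hk : k < (0 :: x).length) (hv : ((0 :: x) : List Int).getD k 0 = 1) :
    innerLoopA y (k : Int) y.length 0
      = combineB (k : Int) ((goL y none 0).getD k none) (((goR y 0).1).getD k none) := by
  cases k with
  | zero => simp at hv
  | succ p =>
    have hx : x.getD p 0 = 1 := by simpa using hv
    have hkm : p + 1 < y.length := hpre p (by simpa using hk) hx
    have hRrw : ((goR y 0).1).getD (p+1) none = (goR (y.drop (p+1)) (0 + (p+1))).2 :=
      goR_fst_getD y 0 (p+1) hkm
    have hdlen : (y.drop (p+1)).length = y.length - (p+1) := by simp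
    refine inner_go y (p+1) _ _ ?_ ?_ ?_ ?_ hkm y.length 0 (by omega)
      (fun d hd => absurd hd (Nat.not_lt_zero d)) (fun d hd => absurd hd (Nat.not_lt_zero d))
    · intro q hq
      rcases goL_char y none 0 (p+1) hkm with ⟨hno, hval⟩ | ⟨d, hd, h1, hmax, hval⟩
      · rw [hval] at hq; exact absurd hq (by simp)
      · rw [hval] at hq
        have hqd : q = d := by simp at hq; omega
        subst hqd
        exact ⟨hd, h1, hmax⟩
    · intro hn q hq
      rcases goL_char y none 0 (p+1) hkm with ⟨hno, hval⟩ | ⟨d, hd, h1, hmax, hval⟩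
      · exact hno q hq
      · rw [hval] at hn; exact absurd hn (by simp)
    · intro q hq
      rw [hRrw] at hq
      rcases goR_snd_char (y.drop (p+1)) (0 + (p+1)) with ⟨hno, hval⟩ | ⟨d, hd, h1, hmin, hval⟩
      · rw [hval] at hq; exact absurd hq (by simp)
      · rw [hval] at hq
        have hqd : q = p + 1 + d := by simp at hq; omega
        subst hqd
        rw [getD_drop_aux] at h1
        refine ⟨by omega, by omega, h1, ?_⟩
        intro q' hq1 hq2
        have := hmin (q' - (p+1)) (by omega)
        rw [getD_drop_aux, show p + 1 + (q' - (p+1)) = q' by omega] at this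
        exact this
    · intro hn q hq1 hq2
      rw [hRrw] at hn
      rcases goR_snd_char (y.drop (p+1)) (0 + (p+1)) with ⟨hno, hval⟩ | ⟨d, hd, h1, hmin, hval⟩
      · have := hno (q - (p+1)) (by omega)
        rwa [getD_drop_aux, show p + 1 + (q - (p+1)) = q by omega] at this
      · rw [hval] at hn; exact absurd hn (by simp)

-- ===== VERDICT (by name: the statement is the Claim_ definition above) =====
theorem sequence_distance_spec : Claim_equal_sequence_distance := by
  intro x y hdom hpre
  unfold Spec_sequence_distance
  rcases hpre with hy | hpre
  · subst hy
    simp only [sequence_distance, sequence_distance_alt, List.length_nil]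
    rw [foldl_if_flat]
    simp [innerLoopA, List.flatMap_eq_nil_iff]
  · by_cases hy : y.length = 0
    · have : y = [] := List.length_eq_zero_iff.mp hy
      subst this
      simp only [sequence_distance, sequence_distance_alt, List.length_nil]
      rw [foldl_if_flat]
      simp [innerLoopA, List.flatMap_eq_nil_iff]
    · simp only [sequence_distance, sequence_distance_alt, if_neg hy]
      rw [foldl_if_flat, foldl_if_flat]
      rw [PySem.List.enumerate_eq_map_pyRange (0 :: x) 0, List.flatMap_map]
      simp only [List.nil_append]
      apply flatMap_congr_mem
      intro i hi
      rw [PySem.List.mem_pyRange_one] at hi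
      obtain ⟨hi0, hilen⟩ := hi
      have hik : i = ((i.toNat : Nat) : Int) := by omega
      set k : Nat := i.toNat with hkdef
      have hklen : k < (0 :: x).length := by
        simp only [List.length_cons] at hilen ⊢; omega
      rw [hik]
      rw [PySem.List.pyGet?_natCast, PySem.List.pyGetD_natCast,
        ← List.getD_eq_getElem?_getD]
      by_cases hv : ((0 :: x) : List Int).getD k 0 = 1
      · rw [if_pos hv, if_pos hv]
        have hL : (PySem.List.pyGet? (goL y none 0) ((k : Nat) : Int)).getD none
            = (goL y none 0).getD k none := by
          rw [PySem.List.pyGet?_natCast, ← List.getD_eq_getElem?_getD]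
        have hR : (PySem.List.pyGet? ((goR y 0).1) ((k : Nat) : Int)).getD none
            = ((goR y 0).1).getD k none := by
          rw [PySem.List.pyGet?_natCast, ← List.getD_eq_getElem?_getD]
        rw [hL, hR]
        exact per_index x y hpre k hklen hv
      · rw [if_neg hv, if_neg hv]
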